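-- pv_equiv track=rewrite | github.com/ssalogel/AdventOfCode | src/AoC2021/Day16.py | get_type4
-- ===== SOURCE A (Python) =====
-- def get_type4(binary_data: str):
--     end_block = 0
--     while binary_data[end_block] != '0':
--         end_block += 5
--     end = end_block + 5
--     num_w_pads = binary_data[:end]
--     bin_num = [b for i, b in enumerate(num_w_pads) if i % 5 != 0]
--     return int(''.join(bin_num), 2), end
-- ===== SOURCE B (Python) =====
-- def get_type4(binary_data: str):
--     pos = 0
--     bits = ""
--     while True:
--         block = binary_data[pos:pos + 5]
--         lead = block[0]
--         bits += block[1:]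
--         pos += 5
--         if lead == '0':
--             return int(bits, 2), pos
-- ===== Notes on version B (the rewrite author's own statement) =====
-- stated objective: simpler
-- what changed: Replaces A's two-pass structure (a while loop scanning only the continuation bits at multiples of 5, then an enumerate-and-filter comprehension over a prefix slice) with a single loop that consumes one 5-bit block per iteration, appending the block's value bits as it goes and stopping right after the block whose first bit is '0'.
-- outside the precondition, e.g. on get_type4('1+1110011'): A returns (59, 10), B returns (59, 10); on get_type4('0'): A raises ValueError, B raises ValueError
import Mathlib
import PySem

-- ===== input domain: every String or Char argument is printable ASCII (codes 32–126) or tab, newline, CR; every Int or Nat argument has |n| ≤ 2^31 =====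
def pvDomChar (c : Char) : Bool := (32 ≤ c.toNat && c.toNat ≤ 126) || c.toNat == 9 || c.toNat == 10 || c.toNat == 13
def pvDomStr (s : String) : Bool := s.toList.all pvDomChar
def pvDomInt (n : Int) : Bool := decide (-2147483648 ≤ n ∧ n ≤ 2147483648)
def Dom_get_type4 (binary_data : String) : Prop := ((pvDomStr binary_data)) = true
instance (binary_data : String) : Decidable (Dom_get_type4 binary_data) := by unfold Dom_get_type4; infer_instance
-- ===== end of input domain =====

-- B replaces A's two-pass structure (scan continuation bits, then an enumerate-filter
-- comprehension over a prefix slice) with a single loop consuming one 5-bit block at a time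
-- (objective: simpler).

-- ===== PORT A =====
-- the while loop: scan indices 0, 5, 10, … until the char is '0'; none = IndexError
def pvFindEnd (L : List Char) (i : Nat) : Option Nat :=
  if h : i < L.length then
    if L[i] = '0' then some i else pvFindEnd L (i + 5)
  else none
termination_by L.length - i
decreasing_by omega

-- int(x, 2): exact on nonempty strings of plain '0'/'1' digits, which Pre_ guarantees
def pvBin (cs : List Char) (acc : Int) : Int :=
  cs.foldl (fun a c => 2 * a + (if c = '1' then 1 else 0)) acc

def get_type4 (binary_data : String) : Int × Int :=
  let L := binary_data.toList
  match pvFindEnd L 0 with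
  | none => (0, 0)   -- IndexError in A; excluded by Pre_
  | some eb =>
    let e := eb + 5
    let num_w_pads := L.take e     -- binary_data[:end]
    let bin_num := ((PySem.List.enumerate num_w_pads 0).filter
        (fun p => ¬ PySem.Int.mod p.1 5 = 0)).map (·.2)
    (pvBin bin_num 0, ((e : Nat) : Int))

-- ===== PORT B =====
-- the single block loop: block = s[pos:pos+5] (slice = clamped drop/take), bits += block[1:]
def pvLoopB (L : List Char) (pos : Nat) (bits : List Char) : Int × Int :=
  match hb : (L.drop pos).take 5 with
  | [] => (0, 0)     -- block[0] IndexError in B; excluded by Pre_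
  | lead :: rest =>
    let bits' := bits ++ rest
    if lead = '0' then (pvBin bits' 0, ((pos + 5 : Nat) : Int))
    else pvLoopB L (pos + 5) bits'
termination_by L.length - pos
decreasing_by
  have : pos < L.length := by
    by_contra h
    simp [List.drop_eq_nil_of_le (Nat.le_of_not_lt h)] at hb
  omega

def get_type4_alt (binary_data : String) : Int × Int :=
  pvLoopB binary_data.toList 0 []

-- ===== PRECONDITION & SPEC =====
-- Pre_ requires a terminating '0' continuation bit to exist and all value bits to be plain
-- '0'/'1' characters with at least one present; this is where A returns without raising an
-- IndexError or a ValueError from int(...,2), except that int(...,2) also tolerates a few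
-- exotic bit strings (leading sign/whitespace/'0b'/underscores), on which A returns and B
-- returns the same value (see cites).
def Pre_get_type4 (binary_data : String) : Prop :=
  2 ≤ binary_data.toList.length ∧
  ∃ k < binary_data.toList.length,
    5 * k < binary_data.toList.length ∧
    binary_data.toList.getD (5 * k) 'x' = '0' ∧
    (∀ j < k, binary_data.toList.getD (5 * j) 'x' ≠ '0') ∧
    (∀ i < min (5 * k + 5) binary_data.toList.length, i % 5 ≠ 0 →
      binary_data.toList.getD i 'x' = '0' ∨ binary_data.toList.getD i 'x' = '1')
instance (binary_data : String) : Decidable (Pre_get_type4 binary_data) := by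
  unfold Pre_get_type4; infer_instance

def pvWitness_get_type4 : String := "01000"

def Spec_get_type4 (binary_data : String) (out : Int × Int) : Prop := out = get_type4_alt binary_data
instance (binary_data : String) (out : Int × Int) : Decidable (Spec_get_type4 binary_data out) := by unfold Spec_get_type4; infer_instance

-- ===== CLAIM (what is proved, stated in full; the proofs are below) =====
def Claim_equal_get_type4 : Prop := ∀ (binary_data : String), Dom_get_type4 binary_data → Pre_get_type4 binary_data → Spec_get_type4 binary_data (get_type4 binary_data)

-- ===== LEMMAS AND PROOFS =====

-- value bits of xs starting at absolute position s: one char at a time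
def pvGB (xs : List Char) (s : Nat) : List Char :=
  match xs with
  | [] => []
  | c :: r => (if s % 5 ≠ 0 then [c] else []) ++ pvGB r (s + 1)

theorem pvGB_enum_dvd : ∀ (xs : List Char) (s : Nat),
    ((PySem.List.enumerate xs (s : Int)).filter
      (fun p => !decide ((5 : Int) ∣ p.1))).map (·.2) = pvGB xs s := by
  intro xs
  induction xs with
  | nil => intro s; simp [pvGB, PySem.List.enumerate_nil]
  | cons c r ih =>
    intro s
    have hs1 : ((s : Int) + 1) = ((s + 1 : Nat) : Int) := by push_cast; ring
    rw [PySem.List.enumerate_cons, hs1]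
    by_cases h : s % 5 = 0
    · have hdvd : (5 : Int) ∣ (s : Int) := by
        exact_mod_cast Nat.dvd_of_mod_eq_zero h
      simp [pvGB, h, hdvd]
      rw [hs1]
      exact ih (s + 1)
    · have hndvd : ¬ (5 : Int) ∣ (s : Int) := by
        intro hc
        have h5 : (5 : Nat) ∣ s := by exact_mod_cast hc
        omega
      simp [pvGB, h, hndvd]
      rw [hs1]
      exact ih (s + 1)

theorem pvGB_enum (xs : List Char) (s : Nat) :
    ((PySem.List.enumerate xs (s : Int)).filter
      (fun p => ¬ PySem.Int.mod p.1 5 = 0)).map (·.2) = pvGB xs s := by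
  have key := pvGB_enum_dvd xs s
  simpa [PySem.Int.mod_eq_zero_iff_dvd] using key

theorem pvGB_block (xs : List Char) (s : Nat) (hs : s % 5 = 0) :
    pvGB xs s = (xs.take 5).drop 1 ++ pvGB (xs.drop 5) (s + 5) := by
  have h1 : (s + 1) % 5 = 1 := by omega
  have h2 : (s + 1 + 1) % 5 = 2 := by omega
  have h3 : (s + 1 + 1 + 1) % 5 = 3 := by omega
  have h4 : (s + 1 + 1 + 1 + 1) % 5 = 4 := by omega
  have h5 : (s + 1 + 1 + 1 + 1 + 1) = s + 5 := by omega
  rcases xs with _ | ⟨a, _ | ⟨b, _ | ⟨c, _ | ⟨d, _ | ⟨e, r⟩⟩⟩⟩⟩ <;>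
    simp [pvGB, hs, h1, h2, h3, h4, h5]

theorem pvFindEnd_ge : ∀ (L : List Char) (i eb : Nat), pvFindEnd L i = some eb → i ≤ eb := by
  intro L i eb
  fun_induction pvFindEnd L i with
  | case1 i h h0 =>
    intro he
    injection he with he
    omega
  | case2 i h h0 ih =>
    intro he
    have := ih he
    omega
  | case3 i h =>
    intro he
    exact absurd he (by simp)

theorem pvLoopB_eq : ∀ (L : List Char) (i : Nat) (bits : List Char), i % 5 = 0 →
    pvLoopB L i bits =
      match pvFindEnd L i with
      | none => (0, 0)
      | some eb => (pvBin (bits ++ pvGB ((L.drop i).take (eb + 5 - i)) i) 0,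
                    ((eb + 5 : Nat) : Int)) := by
  intro L i bits
  fun_induction pvLoopB L i bits with
  | case1 pos bits hb =>
    intro _
    have hlen : L.length ≤ pos := by
      by_contra hP
      have hne : L.drop pos ≠ [] := by
        simp [List.drop_eq_nil_iff]; omega
      rcases hd : L.drop pos with _ | ⟨a, t⟩
      · exact hne hd
      · rw [hd] at hb; simp at hb
    have hn : pvFindEnd L pos = none := by
      unfold pvFindEnd; rw [dif_neg (by omega)]
    simp only [hn]
  | case2 pos bits tail bitsv hb =>
    intro hs
    have hpos : pos < L.length := by
      by_contra hP
      rw [List.drop_eq_nil_of_le (by omega)] at hb; simp at hb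
    have h' : L[pos]? = some '0' := by
      have h2 := congrArg (fun l => l[0]?) hb
      simpa [List.getElem?_take] using h2
    have hget : L[pos] = '0' := by
      rw [List.getElem?_eq_getElem hpos] at h'
      exact Option.some.inj h'
    have hf : pvFindEnd L pos = some pos := by
      unfold pvFindEnd; rw [dif_pos hpos, if_pos hget]
    have hseg : pvGB ((L.drop pos).take (pos + 5 - pos)) pos = tail := by
      have h55 : pos + 5 - pos = 5 := by omega
      rw [h55, pvGB_block _ pos hs]
      have ht : ((L.drop pos).take 5).take 5 = (L.drop pos).take 5 := by
        simp [List.take_take]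
      have hd5 : ((L.drop pos).take 5).drop 5 = [] := by
        apply List.drop_eq_nil_of_le; simp
      rw [ht, hd5, hb]
      simp [pvGB]
    simp only [hf, hseg]
    rfl
  | case3 pos bits lead tail hb bitsv h0 ih =>
    intro hs
    have hpos : pos < L.length := by
      by_contra hP
      rw [List.drop_eq_nil_of_le (by omega)] at hb; simp at hb
    have h' : L[pos]? = some lead := by
      have h2 := congrArg (fun l => l[0]?) hb
      simpa [List.getElem?_take] using h2
    have hget : L[pos] = lead := by
      rw [List.getElem?_eq_getElem hpos] at h'
      exact Option.some.inj h'
    have hf : pvFindEnd L pos = pvFindEnd L (pos + 5) := by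
      conv_lhs => rw [pvFindEnd]
      rw [dif_pos hpos, if_neg (by rw [hget]; exact h0)]
    rw [ih (by omega), hf]
    cases he : pvFindEnd L (pos + 5) with
    | none => simp
    | some eb =>
      have hge : pos + 5 ≤ eb := pvFindEnd_ge L (pos + 5) eb he
      have hseg : pvGB ((L.drop pos).take (eb + 5 - pos)) pos =
          tail ++ pvGB ((L.drop (pos + 5)).take (eb + 5 - (pos + 5))) (pos + 5) := by
        rw [pvGB_block _ pos hs]
        have ht : ((L.drop pos).take (eb + 5 - pos)).take 5 = (L.drop pos).take 5 := by
          rw [List.take_take]; congr 1; omega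
        have hd5 : ((L.drop pos).take (eb + 5 - pos)).drop 5 =
            (L.drop (pos + 5)).take (eb + 5 - (pos + 5)) := by
          rw [List.drop_take, List.drop_drop]
          congr 1
        rw [ht, hd5, hb]
        simp
      simp [hseg]
      rw [show bitsv = bits ++ tail from rfl, List.append_assoc]

-- ===== VERDICT (by name: the statement is the Claim_ definition above) =====
theorem get_type4_spec : Claim_equal_get_type4 := by
  intro s _ _
  unfold Spec_get_type4 get_type4 get_type4_alt
  rw [pvLoopB_eq s.toList 0 [] (by omega)]
  cases h : pvFindEnd s.toList 0 with
  | none => simp only [h]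
  | some eb =>
    have he := pvGB_enum (List.take (eb + 5) s.toList) 0
    simp only [Nat.cast_zero] at he
    simp only [h, List.drop_zero, Nat.sub_zero, List.nil_append, he]
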